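-- pv_equiv track=rewrite | github.com/suchith720/GraphWikipedia | wikipedia_handler/wiki_seealso_handler/filter_wikilinks.py | fix_single_quotes
-- ===== SOURCE A (Python) =====
-- def fix_single_quotes(link):
--     if '"' in link:
--         link_split = link.split('"')
--         for i in range(len(link_split)):
--             if i == 0:
--                 link_split[i] = link_split[i][:-1]
--             elif i == len(link_split)-1:
--                 link_split[i] = link_split[i][1:]
--             else:
--                 link_split[i] = link_split[i][1:-1]
--         return '"'.join(link_split)
--     return link
-- ===== SOURCE B (Python) =====
-- def fix_single_quotes(link):
--     chars = list(link)
--     prevs = [None] + chars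
--     nexts = chars[1:] + [None]
--     return ''.join(c for p, c, nx in zip(prevs, chars, nexts)
--                    if c == '"' or (p != '"' and nx != '"'))
-- ===== Notes on version B (the rewrite author's own statement) =====
-- stated objective: alternative
-- what changed: Replaces A's split-on-quote / positional trim loop / rejoin with a single zip-window pass over the characters that keeps each char unless it is a non-quote neighbour of a quote character.
import Mathlib
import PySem

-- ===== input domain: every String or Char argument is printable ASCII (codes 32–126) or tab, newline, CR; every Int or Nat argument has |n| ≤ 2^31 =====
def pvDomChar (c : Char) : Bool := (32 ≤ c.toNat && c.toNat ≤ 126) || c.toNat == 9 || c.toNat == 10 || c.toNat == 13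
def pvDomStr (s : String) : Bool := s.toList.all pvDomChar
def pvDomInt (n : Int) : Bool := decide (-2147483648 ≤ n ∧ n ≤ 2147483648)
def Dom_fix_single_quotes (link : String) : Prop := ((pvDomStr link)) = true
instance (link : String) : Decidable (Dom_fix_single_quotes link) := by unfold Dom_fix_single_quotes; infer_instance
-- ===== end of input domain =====

-- B replaces A's split/trim/join over '"' by a single zip-window pass that drops
-- characters adjacent to a quote; same return value, alternative decomposition.


-- ===== PORT A =====
-- literal port of A: split on '"', trim each piece by position (first: [:-1],
-- last: [1:], middle: [1:-1]) in an index loop, rejoin with '"'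
def fix_single_quotes (link : String) : String :=
  if PySem.Str.isIn "\"" link then
    let split0 : List (List Char) := PySem.Chars.splitOn link.toList ['"']
    let final :=
      (PySem.List.pyRange 0 (split0.length : Int) 1).foldl
        (fun (ls : List (List Char)) (i : Int) =>
          if i = 0 then
            ls.set i.toNat (PySem.List.slice (PySem.List.pyGetD ls i []) none (some (-1)))
          else if i = (ls.length : Int) - 1 then
            ls.set i.toNat (PySem.List.slice (PySem.List.pyGetD ls i []) (some 1) none)
          else
            ls.set i.toNat (PySem.List.slice (PySem.List.pyGetD ls i []) (some 1) (some (-1))))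
        split0
    String.ofList (PySem.Chars.join ['"'] final)
  else link

-- ===== PORT B =====
-- literal port of B: zip each char with its predecessor and successor (None at the
-- ends), keep c unless it is a non-quote adjacent to a quote, join the kept chars
def fix_single_quotes_alt (link : String) : String :=
  let chars : List Char := link.toList
  let prevs : List (Option Char) := none :: chars.map some
  let nexts : List (Option Char) := (PySem.List.slice chars (some 1) none).map some ++ [none]
  String.ofList
    (((prevs.zip (chars.zip nexts)).filter
        (fun t => t.2.1 == '"' || (!(t.1 == some '"') && !(t.2.2 == some '"')))).map (·.2.1))

-- ===== PRECONDITION & SPEC =====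
def Spec_fix_single_quotes (link : String) (out : String) : Prop := out = fix_single_quotes_alt link
instance (link : String) (out : String) : Decidable (Spec_fix_single_quotes link out) := by unfold Spec_fix_single_quotes; infer_instance

-- ===== CLAIM (what is proved, stated in full; the proofs are below) =====
def Claim_equal_fix_single_quotes : Prop := ∀ (link : String), Dom_fix_single_quotes link → Spec_fix_single_quotes link (fix_single_quotes link)

-- ===== LEMMAS AND PROOFS =====

-- functional form of Python's str.split('"') (single-char separator)
def splitQ (pre : List Char) : List Char → List (List Char)
  | [] => [pre]
  | c :: rest => if c = '"' then pre :: splitQ [] rest else splitQ (pre ++ [c]) rest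

-- common middle ground: one left-to-right scan, state = previous char (none at start)
def scanQ : Option Char → List Char → List Char
  | _, [] => []
  | p, c :: rest =>
    if c = '"' ∨ (p ≠ some '"' ∧ rest.head? ≠ some '"') then c :: scanQ (some c) rest
    else scanQ (some c) rest

-- the trimming A applies to the pieces, as a positional map (L = total #pieces)
def trimFromG (L : Nat) (k : Nat) : List (List Char) → List (List Char)
  | [] => []
  | p :: rest =>
    (if (k : Int) = 0 then p.dropLast
     else if (k : Int) = (L : Int) - 1 then p.tail
     else p.tail.dropLast) :: trimFromG L (k+1) rest

-- A's joined result, piece-level recursion: middle pieces lose first and last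
-- char, the final piece loses its first char
def joinRest : List (List Char) → List Char
  | [] => []
  | [p] => p.tail
  | p :: rest => p.tail.dropLast ++ '"' :: joinRest rest

-- ... and the first piece loses its last char
def joinFirst : List (List Char) → List Char
  | [] => []
  | [q] => q
  | q :: qs => q.dropLast ++ '"' :: joinRest qs

lemma slice_one_neg_one (l : List Char) :
    PySem.List.slice l (some 1) (some (-1)) = l.tail.dropLast := by
  simp [PySem.List.slice]
  cases l with
  | nil => simp
  | cons c t => simp [List.dropLast_eq_take]

lemma splitOn_go_eq (l : List Char) : ∀ (f : Nat) (cur : List Char) (acc : List (List Char)),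
    l.length < f →
    PySem.Chars.splitOn.go ['"'] f l cur acc = acc.reverse ++ splitQ cur.reverse l := by
  induction l with
  | nil =>
    intro f cur acc hf
    obtain ⟨f, rfl⟩ : ∃ g, f = g + 1 := ⟨f - 1, by omega⟩
    rw [PySem.Chars.splitOn.go]
    · simp [splitQ]
    · omega
  | cons c rest ih =>
    intro f cur acc hf
    obtain ⟨f, rfl⟩ : ∃ g, f = g + 1 := ⟨f - 1, by omega⟩
    rw [PySem.Chars.splitOn.go]
    by_cases hc : c = '"'
    · subst hc
      have hpre : ['"'].isPrefixOf ('"' :: rest) = true := by simp [List.isPrefixOf]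
      simp only [hpre, if_pos, List.length_cons, List.drop_succ_cons, List.length_nil, List.drop_zero]
      rw [ih f [] (cur.reverse :: acc) (by simp at hf ⊢; omega)]
      simp [splitQ]
    · have hpre : ['"'].isPrefixOf (c :: rest) = false := by
        simp [List.isPrefixOf]; exact fun h => hc h.symm
      rw [if_neg (by simp [hpre])]
      rw [ih f (c :: cur) acc (by simp at hf ⊢; omega)]
      simp [splitQ, hc]

lemma splitOn_eq_splitQ (s : List Char) :
    PySem.Chars.splitOn s ['"'] = splitQ [] s := by
  rw [PySem.Chars.splitOn, splitOn_go_eq s (s.length+1) [] [] (by omega)]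
  simp

lemma splitQ_shape (s : List Char) :
    ∃ q qs, splitQ [] s = q :: qs ∧ ∀ pre, splitQ pre s = (pre ++ q) :: qs := by
  induction s with
  | nil => exact ⟨[], [], by simp [splitQ], fun pre => by simp [splitQ]⟩
  | cons c rest ih =>
    obtain ⟨q, qs, h0, hpre⟩ := ih
    by_cases hc : c = '"'
    · exact ⟨[], splitQ [] rest, by simp [splitQ, hc], fun pre => by simp [splitQ, hc]⟩
    · refine ⟨c :: q, qs, ?_, fun pre => ?_⟩
      · simp [splitQ, hc]; simpa using hpre [c]
      · simp [splitQ, hc]; simpa using hpre (pre ++ [c])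

lemma splitQ_noquote (s : List Char) (h : '"' ∉ s) : splitQ [] s = [s] := by
  induction s with
  | nil => simp [splitQ]
  | cons c rest ih =>
    simp at h
    obtain ⟨q, qs, h0, hpre⟩ := splitQ_shape rest
    have := ih h.2
    rw [h0] at this
    obtain ⟨rfl, rfl⟩ : q = rest ∧ qs = [] := by
      injection this with a b; exact ⟨a, b⟩
    simp [splitQ, Ne.symm h.1, hpre]

lemma splitQ_quote (s : List Char) (h : '"' ∈ s) : (splitQ [] s).tail ≠ [] := by
  induction s with
  | nil => simp at h
  | cons c rest ih =>
    by_cases hc : c = '"'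
    · obtain ⟨q, qs, h0, _⟩ := splitQ_shape rest
      simp [splitQ, hc, h0]
    · replace h : '"' ∈ rest := by cases h with | head => exact absurd rfl hc | tail _ h => exact h
      obtain ⟨q, qs, h0, hpre⟩ := splitQ_shape rest
      have := ih h
      rw [h0] at this
      simp [splitQ, hc, hpre]
      simpa using this

lemma foldstep (v : List (List Char)) : ∀ (u : List (List Char)),
    ((List.range v.length).map (fun (k : Nat) => ((u.length : Int) + (k : Int)))).foldl
      (fun (ls : List (List Char)) (i : Int) =>
        if i = 0 then
          ls.set i.toNat (PySem.List.slice (PySem.List.pyGetD ls i []) none (some (-1)))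
        else if i = (ls.length : Int) - 1 then
          ls.set i.toNat (PySem.List.slice (PySem.List.pyGetD ls i []) (some 1) none)
        else
          ls.set i.toNat (PySem.List.slice (PySem.List.pyGetD ls i []) (some 1) (some (-1))))
      (u ++ v)
    = u ++ trimFromG (u.length + v.length) u.length v := by
  induction v with
  | nil => intro u; simp [trimFromG]
  | cons p v' ih =>
    intro u
    rw [List.length_cons, List.range_succ_eq_map, List.map_cons, List.foldl_cons]
    have hget : PySem.List.pyGetD (u ++ p :: v') ((u.length : Int) + ((0:Nat) : Int)) [] = p := by
      rw [show (u.length : Int) + ((0:Nat) : Int) = (u.length : Int) by push_cast; ring,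
        PySem.List.pyGetD_natCast]
      simp
    have hset : ∀ x : List Char,
        (u ++ p :: v').set ((u.length : Int) + ((0:Nat) : Int)).toNat x = u ++ x :: v' := by
      intro x
      have h : ((u.length : Int) + ((0:Nat) : Int)).toNat = u.length := by omega
      rw [h]; simp
    set tr : List Char := (if ((u.length : Nat) : Int) = 0 then p.dropLast
     else if ((u.length : Nat) : Int) = ((u.length + (v'.length + 1) : Nat) : Int) - 1 then p.tail
     else p.tail.dropLast) with htr
    have hstep :
        (if ((u.length : Int) + ((0:Nat) : Int)) = 0 then
          (u ++ p :: v').set ((u.length : Int) + ((0:Nat) : Int)).toNat (PySem.List.slice (PySem.List.pyGetD (u ++ p :: v') ((u.length : Int) + ((0:Nat) : Int)) []) none (some (-1)))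
        else if ((u.length : Int) + ((0:Nat) : Int)) = (((u ++ p :: v').length) : Int) - 1 then
          (u ++ p :: v').set ((u.length : Int) + ((0:Nat) : Int)).toNat (PySem.List.slice (PySem.List.pyGetD (u ++ p :: v') ((u.length : Int) + ((0:Nat) : Int)) []) (some 1) none)
        else
          (u ++ p :: v').set ((u.length : Int) + ((0:Nat) : Int)).toNat (PySem.List.slice (PySem.List.pyGetD (u ++ p :: v') ((u.length : Int) + ((0:Nat) : Int)) []) (some 1) (some (-1))))
        = u ++ tr :: v' := by
      by_cases h1 : ((u.length : Int) + ((0:Nat) : Int)) = 0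
      · rw [if_pos h1]
        have hx := hset (PySem.List.slice (PySem.List.pyGetD (u ++ p :: v') ((u.length : Int) + ((0:Nat) : Int)) []) none (some (-1)))
        rw [hx, hget, PySem.List.slice_to_neg_one, htr, if_pos (by omega : ((u.length : Nat) : Int) = 0)]
      · by_cases h2 : ((u.length : Int) + ((0:Nat) : Int)) = (((u ++ p :: v').length) : Int) - 1
        · rw [if_neg h1, if_pos h2, hset, hget, PySem.List.slice_from_one, htr,
            if_neg (by omega : ¬ ((u.length : Nat) : Int) = 0),
            if_pos (by simp at h2 ⊢; omega)]
        · rw [if_neg h1, if_neg h2, hset, hget, slice_one_neg_one, htr,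
            if_neg (by omega : ¬ ((u.length : Nat) : Int) = 0),
            if_neg (by simp at h2 ⊢; omega)]
    rw [hstep]
    have hmap : (List.map Nat.succ (List.range v'.length)).map (fun (k : Nat) => ((u.length : Int) + (k : Int)))
        = (List.range v'.length).map (fun (k : Nat) => (((u ++ [tr]).length : Int) + (k : Int))) := by
      rw [List.map_map]
      apply List.map_congr_left
      intro a _
      simp
      omega
    have hul : u ++ tr :: v' = (u ++ [tr]) ++ v' := by simp
    rw [hmap, hul, ih (u ++ [tr])]
    simp only [trimFromG, List.append_assoc, List.singleton_append, List.length_append,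
      List.length_singleton]
    have e1 : u.length + 1 + v'.length = u.length + (v'.length + 1) := by omega
    rw [e1]

lemma trimFromG_cons (L k : Nat) (p : List Char) (rest : List (List Char)) :
    trimFromG L k (p :: rest) = (if (k : Int) = 0 then p.dropLast
     else if (k : Int) = (L : Int) - 1 then p.tail
     else p.tail.dropLast) :: trimFromG L (k+1) rest := rfl

lemma join_trim_rest (L : Nat) : ∀ (qs : List (List Char)) (k : Nat), 0 < k → k + qs.length = L →
    PySem.Chars.join ['"'] (trimFromG L k qs) = joinRest qs := by
  intro qs
  induction qs with
  | nil => intro k _ _; simp [trimFromG, joinRest, PySem.Chars.join_nil]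
  | cons p rest ih =>
    intro k hk hL
    cases rest with
    | nil =>
      have h1 : ¬ ((k : Nat) : Int) = 0 := by omega
      have h2 : ((k : Nat) : Int) = (L : Int) - 1 := by simp at hL; omega
      rw [trimFromG_cons, if_neg h1, if_pos h2]
      simp only [trimFromG]
      rw [PySem.Chars.join_singleton]
      simp [joinRest]
    | cons q rest' =>
      have h1 : ¬ ((k : Nat) : Int) = 0 := by omega
      have h2 : ¬ ((k : Nat) : Int) = (L : Int) - 1 := by simp at hL; omega
      rw [trimFromG_cons, if_neg h1, if_neg h2, trimFromG_cons, PySem.Chars.join_cons_cons,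
        ← trimFromG_cons, ih (k+1) (by omega) (by simp at hL ⊢; omega)]
      simp [joinRest]

lemma join_trim (q : List Char) (qs : List (List Char)) (h : qs ≠ []) :
    PySem.Chars.join ['"'] (trimFromG (q :: qs).length 0 (q :: qs)) = joinFirst (q :: qs) := by
  obtain ⟨p, rest, rfl⟩ : ∃ p rest, qs = p :: rest := by
    cases qs with
    | nil => exact absurd rfl h
    | cons a b => exact ⟨a, b, rfl⟩
  rw [trimFromG_cons, if_pos (by simp : ((0:Nat) : Int) = 0), trimFromG_cons,
    PySem.Chars.join_cons_cons, ← trimFromG_cons,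
    join_trim_rest (q :: p :: rest).length (p :: rest) 1 (by omega) (by simp; omega)]
  simp [joinFirst]

lemma zip_filter_eq_scanQ (s : List Char) : ∀ (p : Option Char),
    (((p :: s.map some).zip (s.zip (s.tail.map some ++ [none]))).filter
        (fun t => t.2.1 == '"' || (!(t.1 == some '"') && !(t.2.2 == some '"')))).map (·.2.1)
      = scanQ p s := by
  induction s with
  | nil => intro p; simp [scanQ]
  | cons c rest ih =>
    intro p
    cases rest with
    | nil =>
      by_cases h1 : c = '"' <;> by_cases h2 : p = some '"' <;>
        simp [scanQ, h1, h2, List.filter]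
    | cons d rest' =>
      simp only [List.map_cons, List.tail_cons, List.cons_append, List.zip_cons_cons]
      rw [List.filter_cons]
      have hrec := ih (some c)
      simp only [List.map_cons, List.tail_cons] at hrec
      by_cases h1 : c = '"'
      · rw [if_pos (by simp [h1])]
        simp only [List.map_cons]
        rw [hrec]
        simp [scanQ, h1]
      · by_cases h2 : p = some '"'
        · rw [if_neg (by simp [h1, h2]), hrec]
          simp [scanQ, h1, h2]
        · by_cases h3 : d = '"'
          · rw [if_neg (by simp [h1, h3]), hrec]
            simp [scanQ, h1, h3]
          · rw [if_pos (by simp [h1, h2, h3])]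
            simp only [List.map_cons]
            rw [hrec]
            simp [scanQ, h1, h2, h3]

lemma scanQ_cons (p : Option Char) (c : Char) (rest : List Char) :
    scanQ p (c :: rest) =
      if c = '"' ∨ (p ≠ some '"' ∧ rest.head? ≠ some '"') then c :: scanQ (some c) rest
      else scanQ (some c) rest := rfl

lemma scanQ_eq_join (s : List Char) :
    (∀ p : Option Char, p ≠ some '"' → scanQ p s = joinFirst (splitQ [] s)) ∧
    scanQ (some '"') s = joinRest (splitQ [] s) := by
  induction s with
  | nil => exact ⟨fun p _ => by simp [scanQ, splitQ, joinFirst], by simp [scanQ, splitQ, joinRest]⟩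
  | cons c rest ih =>
    obtain ⟨q', qs', hq0, hqpre⟩ := splitQ_shape rest
    obtain ⟨ihN, ihQ⟩ := ih
    by_cases hc : c = '"'
    · subst hc
      have hsplit : splitQ [] ('"' :: rest) = [] :: q' :: qs' := by simp [splitQ, hq0]
      have key : scanQ (some '"') rest = joinRest (q' :: qs') := by rw [ihQ, hq0]
      constructor
      · intro p hp
        rw [hsplit, scanQ_cons, if_pos (Or.inl rfl), key]
        cases qs' with
        | nil => simp [joinFirst, joinRest]
        | cons a b => simp [joinFirst, joinRest]
      · rw [hsplit, scanQ_cons, if_pos (Or.inl rfl), key]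
        cases qs' with
        | nil => simp [joinRest]
        | cons a b => simp [joinRest]
    · have hsplit : splitQ [] (c :: rest) = (c :: q') :: qs' := by
        simp [splitQ, hc]; simpa using hqpre [c]
      have hN : scanQ (some c) rest = joinFirst (q' :: qs') := by
        rw [ihN (some c) (by simp [hc]), hq0]
      constructor
      · intro p hp
        rw [hsplit]
        cases rest with
        | nil =>
          obtain ⟨rfl, rfl⟩ : q' = [] ∧ qs' = [] := by
            simp [splitQ] at hq0; exact ⟨hq0.1, hq0.2⟩
          simp [scanQ, hc, hp, joinFirst]
        | cons d rest' =>
          by_cases hd : d = '"'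
          · -- rest starts with a quote: c is dropped
            subst hd
            have hq'nil : q' = [] ∧ qs' ≠ [] := by
              obtain ⟨a, b, h0, _⟩ := splitQ_shape rest'
              simp [splitQ, h0] at hq0
              exact ⟨hq0.1, by rw [← hq0.2]; simp⟩
            obtain ⟨rfl, hqs'⟩ := hq'nil
            rw [scanQ_cons, if_neg (by simp [hc]), hN]
            cases qs' with
            | nil => exact absurd rfl hqs'
            | cons a b => simp [joinFirst]
          · -- c is kept
            have hq'cons : ∃ t, q' = d :: t := by
              obtain ⟨a, b, h0, hpre⟩ := splitQ_shape rest'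
              simp [splitQ, hd, hpre [d]] at hq0
              exact ⟨a, hq0.1.symm⟩
            obtain ⟨t, rfl⟩ := hq'cons
            rw [scanQ_cons, if_pos (Or.inr ⟨hp, by simp [hd]⟩), hN]
            cases qs' with
            | nil => simp [joinFirst]
            | cons a b => simp [joinFirst]
      · -- after a quote: c is dropped
        rw [hsplit, scanQ_cons, if_neg (by simp [hc]), hN]
        cases qs' with
        | nil => simp [joinFirst, joinRest]
        | cons a b => simp [joinFirst, joinRest]

-- ===== VERDICT (by name: the statement is the Claim_ definition above) =====
theorem fix_single_quotes_spec : Claim_equal_fix_single_quotes := by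
  intro link _
  show fix_single_quotes link = fix_single_quotes_alt link
  have hB : fix_single_quotes_alt link = String.ofList (scanQ none link.toList) := by
    unfold fix_single_quotes_alt
    simp only [PySem.List.slice_from_one, zip_filter_eq_scanQ]
  rw [hB]
  unfold fix_single_quotes
  by_cases h : PySem.Str.isIn "\"" link = true
  · rw [if_pos h]
    have hmem : '"' ∈ link.toList := by
      have hin : PySem.Chars.isIn ['"'] link.toList = true := h
      exact (List.singleton_infix_iff _ _).mp ((PySem.Chars.isIn_iff_infix _ _).mp hin)
    obtain ⟨q, qs, hq0, _⟩ := splitQ_shape link.toList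
    have hqs : qs ≠ [] := by
      have := splitQ_quote link.toList hmem
      rw [hq0] at this
      simpa using this
    have hsplit : PySem.Chars.splitOn link.toList ['"'] = q :: qs := by
      rw [splitOn_eq_splitQ, hq0]
    have hfold := foldstep (q :: qs) []
    simp only [List.length_nil, List.nil_append, Nat.cast_zero, zero_add] at hfold
    rw [(scanQ_eq_join link.toList).1 none (by simp), hq0, ← join_trim q qs hqs]
    simp only [hsplit, PySem.List.pyRange_one]
    congr 1
    rw [← hfold]
    congr 1
    simp
  · rw [if_neg h]
    have hnot : '"' ∉ link.toList := by
      have hin : PySem.Chars.isIn ['"'] link.toList = false := by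
        have h' : ¬ PySem.Str.isIn "\"" link = true := h
        simpa [PySem.Str.isIn] using h'
      exact fun hm => (PySem.Chars.isIn_eq_false_iff _ _).mp hin
        ((List.singleton_infix_iff _ _).mpr hm)
    rw [(scanQ_eq_join link.toList).1 none (by simp), splitQ_noquote link.toList hnot]
    simp [joinFirst, String.ofList_toList]
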